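-- pv_equiv track=rewrite | github.com/FiditeNemini/mlx-abliteration | scripts/probe_capture.py | find_probe_idx_from_tokens
-- ===== SOURCE A (Python) =====
-- def find_probe_idx_from_tokens(token_list, marker_ids):
--     if not marker_ids:
--         return -1
--     m = list(marker_ids)
--     for i in range(len(token_list) - len(m), -1, -1):
--         if token_list[i:i+len(m)] == m:
--             # if marker followed by token, use following token; if at end, use marker token
--             potential_idx = i + len(m)
--             if potential_idx < len(token_list):
--                 return potential_idx
--             else:
--                 return i + len(m) - 1
--     return -1
-- ===== SOURCE B (Python) =====
-- def find_probe_idx_from_tokens(token_list, marker_ids):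
--     if not marker_ids:
--         return -1
--     n, k = len(token_list), len(marker_ids)
--     best = -1
--     for i in range(n - k + 1):
--         if all(token_list[i + j] == marker_ids[j] for j in range(k)):
--             best = i
--     return -1 if best < 0 else min(best + k, n - 1)
-- ===== Notes on version B (the rewrite author's own statement) =====
-- stated objective: alternative
-- what changed: B scans forward once keeping the last matching start (element-wise comparison, no slice copies) and derives the return value by the closed form min(best+k, n-1), instead of A's backward scan with early return, per-position slice allocation and a two-branch epilogue.
import Mathlib
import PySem

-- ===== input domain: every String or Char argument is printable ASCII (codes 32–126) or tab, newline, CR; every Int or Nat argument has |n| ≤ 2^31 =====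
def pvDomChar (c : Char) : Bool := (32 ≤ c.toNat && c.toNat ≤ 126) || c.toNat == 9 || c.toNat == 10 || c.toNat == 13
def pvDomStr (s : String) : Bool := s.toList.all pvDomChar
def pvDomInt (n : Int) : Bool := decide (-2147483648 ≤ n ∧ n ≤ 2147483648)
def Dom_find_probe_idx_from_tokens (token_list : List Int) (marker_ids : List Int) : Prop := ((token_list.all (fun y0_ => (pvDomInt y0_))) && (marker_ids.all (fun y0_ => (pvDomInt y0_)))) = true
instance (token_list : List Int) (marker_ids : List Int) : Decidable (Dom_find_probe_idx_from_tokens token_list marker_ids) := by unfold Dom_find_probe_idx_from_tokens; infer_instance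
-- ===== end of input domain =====

-- B replaces A's backward early-return slice scan by a forward pass keeping the last
-- element-wise match and a closed-form epilogue min(best+k, n-1) (objective: alternative).


-- ===== PORT A =====
-- the for-loop over range(len(token_list)-len(m), -1, -1) with early return
def pvALoop (token_list m : List Int) : List Int → Int
  | [] => -1
  | i :: rest =>
    if PySem.List.slice token_list (some i) (some (i + (m.length : Int))) = m then
      (if i + (m.length : Int) < (token_list.length : Int) then i + (m.length : Int)
       else i + (m.length : Int) - 1)
    else pvALoop token_list m rest

def find_probe_idx_from_tokens (token_list : List Int) (marker_ids : List Int) : Int :=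
  if marker_ids = [] then -1
  else
    pvALoop token_list marker_ids
      (PySem.List.pyRange ((token_list.length : Int) - (marker_ids.length : Int)) (-1) (-1))

-- ===== PORT B =====
-- all(token_list[i+j] == marker_ids[j] for j in range(k))
def pvMatchAt (token_list marker_ids : List Int) (i : Int) : Bool :=
  (PySem.List.pyRange 0 (marker_ids.length : Int) 1).all
    (fun j => PySem.List.pyGet? token_list (i + j) == PySem.List.pyGet? marker_ids j)

def find_probe_idx_from_tokens_alt (token_list : List Int) (marker_ids : List Int) : Int :=
  if marker_ids = [] then -1
  else
    let n : Int := token_list.length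
    let k : Int := marker_ids.length
    let best : Int :=
      (PySem.List.pyRange 0 (n - k + 1) 1).foldl
        (fun best i => if pvMatchAt token_list marker_ids i then i else best) (-1)
    if best < 0 then -1 else min (best + k) (n - 1)

-- ===== PRECONDITION & SPEC =====
def Spec_find_probe_idx_from_tokens (token_list : List Int) (marker_ids : List Int) (out : Int) : Prop := out = find_probe_idx_from_tokens_alt token_list marker_ids
instance (token_list : List Int) (marker_ids : List Int) (out : Int) : Decidable (Spec_find_probe_idx_from_tokens token_list marker_ids out) := by unfold Spec_find_probe_idx_from_tokens; infer_instance

-- ===== CLAIM (what is proved, stated in full; the proofs are below) =====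
def Claim_equal_find_probe_idx_from_tokens : Prop := ∀ (token_list : List Int) (marker_ids : List Int), Dom_find_probe_idx_from_tokens token_list marker_ids → Spec_find_probe_idx_from_tokens token_list marker_ids (find_probe_idx_from_tokens token_list marker_ids)

-- ===== LEMMAS AND PROOFS =====

-- A's loop is "first match in the scanned list, with A's epilogue"
theorem pvALoop_eq_find? (tl m : List Int) (l : List Int) :
    pvALoop tl m l =
      match l.find? (fun i => PySem.List.slice tl (some i) (some (i + (m.length : Int))) = m) with
      | some i => (if i + (m.length : Int) < (tl.length : Int) then i + (m.length : Int)
                   else i + (m.length : Int) - 1)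
      | none => -1 := by
  induction l with
  | nil => rfl
  | cons i rest ih =>
    by_cases h : PySem.List.slice tl (some i) (some (i + (m.length : Int))) = m
    · simp [pvALoop, List.find?, h]
    · simp [pvALoop, List.find?, h, ih]

-- B's fold is "first match in the reversed list"
theorem pvFoldl_last_match (q : Int → Bool) (l : List Int) (b : Int) :
    l.foldl (fun best i => if q i then i else best) b =
      match l.reverse.find? q with
      | some i => i
      | none => b := by
  induction l generalizing b with
  | nil => rfl
  | cons i rest ih =>
    simp only [List.foldl_cons, List.reverse_cons, List.find?_append, ih]
    cases hr : rest.reverse.find? q with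
    | some j => simp
    | none =>
      by_cases h : q i = true
      · simp [List.find?, h]
      · rw [Bool.not_eq_true] at h
        simp [List.find?, h]

theorem pvMatchAt_eq_slice (tl mk : List Int) (i : Int)
    (h0 : 0 ≤ i) (h1 : i + (mk.length : Int) ≤ (tl.length : Int)) :
    (pvMatchAt tl mk i = true) ↔
      PySem.List.slice tl (some i) (some (i + (mk.length : Int))) = mk := by
  have hslice : PySem.List.slice tl (some i) (some (i + (mk.length : Int))) =
      (tl.drop i.toNat).take mk.length := by
    rw [PySem.List.slice_toNat tl h0 (by omega)]
    have hlen : ((i + (mk.length : Int)).toNat - i.toNat) = mk.length := by omega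
    rw [hlen]
  rw [hslice]
  constructor
  · intro hm
    apply List.ext_getElem?
    intro t
    by_cases ht : t < mk.length
    · have htl : i.toNat + t < tl.length := by omega
      have h2 : ((tl.drop i.toNat).take mk.length)[t]? = tl[i.toNat + t]? := by
        simp [ht, List.getElem?_drop]
      rw [h2]
      simp only [pvMatchAt, List.all_eq_true] at hm
      have hmem : ((t : Int)) ∈ PySem.List.pyRange 0 (mk.length : Int) 1 := by
        rw [PySem.List.mem_pyRange_one]
        exact ⟨by omega, by exact_mod_cast ht⟩
      have hv := hm _ hmem
      rw [PySem.List.pyGet?_of_nonneg tl (by omega), PySem.List.pyGet?_of_nonneg mk (by omega)] at hv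
      have hidx : (i + (t : Int)).toNat = i.toNat + t := by omega
      have hidx2 : ((t : Int)).toNat = t := by omega
      rw [hidx, hidx2] at hv
      exact beq_iff_eq.mp hv
    · have hnone1 : ((tl.drop i.toNat).take mk.length)[t]? = none := by
        rw [List.getElem?_eq_none_iff]
        simp
        omega
      have hnone2 : mk[t]? = none := by
        rw [List.getElem?_eq_none_iff]
        omega
      rw [hnone1, hnone2]
  · intro hs
    simp only [pvMatchAt, List.all_eq_true]
    intro j hjmem
    rw [PySem.List.mem_pyRange_one] at hjmem
    obtain ⟨hj0, hjk⟩ := hjmem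
    have hjk' : j.toNat < mk.length := by omega
    rw [PySem.List.pyGet?_of_nonneg tl (by omega), PySem.List.pyGet?_of_nonneg mk (by omega)]
    have := congrArg (fun l => l[j.toNat]?) hs
    simp only at this
    have h2 : ((tl.drop i.toNat).take mk.length)[j.toNat]? = tl[i.toNat + j.toNat]? := by
      simp [hjk', List.getElem?_drop]
    rw [h2] at this
    have hidx : (i + j).toNat = i.toNat + j.toNat := by omega
    rw [hidx, this]
    exact beq_self_eq_true _

-- find? sees the same matches under both predicates on the scanned range
theorem pv_find?_congr {p q : Int → Bool} (l : List Int) (h : ∀ x ∈ l, p x = q x) :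
    l.find? p = l.find? q := by
  induction l with
  | nil => rfl
  | cons x xs ih =>
    have hx := h x (List.mem_cons_self)
    by_cases hp : p x = true
    · simp [List.find?, hp, hx ▸ hp]
    · have hq : q x = false := by rw [hx, Bool.not_eq_true] at hp; exact hp
      rw [Bool.not_eq_true] at hp
      simp only [List.find?, hp, hq]
      exact ih (fun y hy => h y (List.mem_cons_of_mem _ hy))

-- ===== VERDICT (by name: the statement is the Claim_ definition above) =====
theorem find_probe_idx_from_tokens_spec : Claim_equal_find_probe_idx_from_tokens := by
  intro tl mk _
  unfold Spec_find_probe_idx_from_tokens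
  by_cases hmk : mk = []
  · simp [find_probe_idx_from_tokens, find_probe_idx_from_tokens_alt, hmk]
  · have hk1 : 1 ≤ (mk.length : Int) := by
      have : mk.length ≠ 0 := fun h => hmk (List.eq_nil_of_length_eq_zero h)
      omega
    simp only [find_probe_idx_from_tokens, find_probe_idx_from_tokens_alt, hmk, ite_false]
    have hrev : PySem.List.pyRange ((tl.length : Int) - (mk.length : Int)) (-1) (-1) =
        (PySem.List.pyRange 0 ((tl.length : Int) - (mk.length : Int) + 1) 1).reverse := by
      rw [PySem.List.pyRange_neg_one_eq_reverse]
      norm_num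
    rw [hrev, pvALoop_eq_find?, pvFoldl_last_match]
    rw [pv_find?_congr ((PySem.List.pyRange 0 ((tl.length : Int) - (mk.length : Int) + 1) 1).reverse)
      (p := fun i => PySem.List.slice tl (some i) (some (i + (mk.length : Int))) = mk)
      (q := pvMatchAt tl mk)
      (by
        intro i hi
        rw [List.mem_reverse, PySem.List.mem_pyRange_one] at hi
        have hiff := pvMatchAt_eq_slice tl mk i hi.1 (by omega)
        simp [← hiff])]
    cases hf : ((PySem.List.pyRange 0 ((tl.length : Int) - (mk.length : Int) + 1) 1).reverse.find?
        (pvMatchAt tl mk)) with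
    | none => simp
    | some i =>
      have hmem : i ∈ (PySem.List.pyRange 0 ((tl.length : Int) - (mk.length : Int) + 1) 1).reverse :=
        List.mem_of_find?_eq_some hf
      rw [List.mem_reverse, PySem.List.mem_pyRange_one] at hmem
      obtain ⟨hi0, hik⟩ := hmem
      have hnotneg : ¬ i < 0 := by omega
      have key : (if i + (mk.length : Int) < (tl.length : Int) then i + (mk.length : Int)
            else i + (mk.length : Int) - 1)
          = (if i < 0 then (-1 : Int) else min (i + (mk.length : Int)) ((tl.length : Int) - 1)) := by
        rw [if_neg hnotneg, Int.min_def]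
        split_ifs with h1 h2 <;> omega
      exact key
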